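-- pv_equiv track=rewrite | github.com/ZhichenRen/fastIE | fastie/tasks/re/pure/pure_pipe.py | get_attention_mask
-- ===== SOURCE A (Python) =====
-- def get_attention_mask(tokens_type):
--     # * The return value mask have shape tokens_len * tokens_len
--     attention_mask = []
--     for from_token in tokens_type:
--         attention_mask_line = []
--         for to_token in tokens_type:
--             if to_token <= 1:
--                 attention_mask_line.append(1)
--             elif from_token == to_token:
--                 attention_mask_line.append(1)
--             else:
--                 attention_mask_line.append(0)
--         attention_mask.append(attention_mask_line)
--     return attention_mask
-- ===== SOURCE B (Python) =====
-- def get_attention_mask(tokens_type):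
--     # Build one template row, plus an index table mapping each type > 1
--     # to the columns holding it; each output row is the template with
--     # that type's columns switched on.
--     base = [1 if t <= 1 else 0 for t in tokens_type]
--     groups = {}
--     for j, t in enumerate(tokens_type):
--         if t > 1:
--             groups.setdefault(t, []).append(j)
--     mask = []
--     for f in tokens_type:
--         row = base[:]
--         for j in groups.get(f, []):
--             row[j] = 1
--         mask.append(row)
--     return mask
-- ===== Notes on version B (the rewrite author's own statement) =====
-- stated objective: alternative
-- what changed: Replaces the per-cell nested comparison loop by building one template row plus a type->column-indices table in a single pass, then assembling each row as a copy of the template with that type's columns set to 1.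
import Mathlib
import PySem

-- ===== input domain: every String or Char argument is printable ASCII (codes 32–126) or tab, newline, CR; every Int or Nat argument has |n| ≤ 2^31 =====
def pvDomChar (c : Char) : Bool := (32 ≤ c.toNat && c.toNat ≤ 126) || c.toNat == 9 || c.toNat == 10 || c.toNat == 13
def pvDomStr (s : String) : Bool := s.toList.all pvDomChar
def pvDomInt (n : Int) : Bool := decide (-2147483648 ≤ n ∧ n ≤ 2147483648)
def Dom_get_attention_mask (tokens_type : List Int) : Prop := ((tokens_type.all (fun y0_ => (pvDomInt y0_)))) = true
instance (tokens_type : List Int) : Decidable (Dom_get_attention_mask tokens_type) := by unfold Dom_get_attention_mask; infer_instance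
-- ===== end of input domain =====

-- B replaces the per-cell comparison loop by a template row plus a type->column-index table (same asymptotic cost, different row assembly).

-- ===== PORT A =====
def get_attention_mask (tokens_type : List Int) : List (List Int) :=
  tokens_type.foldl (fun attention_mask from_token =>
    attention_mask ++
      [tokens_type.foldl (fun line to_token =>
        if to_token ≤ 1 then line ++ [(1 : Int)]
        else if from_token = to_token then line ++ [(1 : Int)]
        else line ++ [(0 : Int)]) []]) []

-- ===== PORT B =====
def get_attention_mask_alt (tokens_type : List Int) : List (List Int) :=
  let base := tokens_type.map (fun t => if t ≤ 1 then (1 : Int) else 0)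
  let groups : PySem.Dict Int (List Int) :=
    (PySem.List.enumerate tokens_type 0).foldl
      (fun d p => if 1 < p.2 then d.modify p.2 [] (· ++ [p.1]) else d)
      PySem.Dict.empty
  tokens_type.foldl (fun mask f =>
    mask ++ [(groups.getD f []).foldl (fun row j => PySem.List.pySetD row j (1 : Int)) base]) []

-- ===== PRECONDITION & SPEC =====
def Spec_get_attention_mask (tokens_type : List Int) (out : List (List Int)) : Prop := out = get_attention_mask_alt tokens_type
instance (tokens_type : List Int) (out : List (List Int)) : Decidable (Spec_get_attention_mask tokens_type out) := by unfold Spec_get_attention_mask; infer_instance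

-- ===== CLAIM (what is proved, stated in full; the proofs are below) =====
def Claim_equal_get_attention_mask : Prop := ∀ (tokens_type : List Int), Dom_get_attention_mask tokens_type → Spec_get_attention_mask tokens_type (get_attention_mask tokens_type)

-- ===== LEMMAS AND PROOFS =====

-- the common cell value and the common n×n matrix both programs compute
def pvCell (f t : Int) : Int := if t ≤ 1 then 1 else if f = t then 1 else 0

def pvMatrix (ts : List Int) : List (List Int) := ts.map (fun f => ts.map (pvCell f))

-- append-accumulator loops are maps
theorem pv_foldl_app {α β : Type} (g : α → β) (ts : List α) :
    ∀ (acc : List β), ts.foldl (fun a x => a ++ [g x]) acc = acc ++ ts.map g := by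
  induction ts with
  | nil => simp
  | cons x xs ih => intro acc; simp [List.foldl_cons, ih]

-- A's inner loop is the cell map
theorem pvA_inner (ts : List Int) (f : Int) (acc : List Int) :
    ts.foldl (fun line t =>
      if t ≤ 1 then line ++ [(1 : Int)]
      else if f = t then line ++ [(1 : Int)]
      else line ++ [(0 : Int)]) acc = acc ++ ts.map (pvCell f) := by
  have h : (fun (line : List Int) (t : Int) =>
      if t ≤ 1 then line ++ [(1 : Int)]
      else if f = t then line ++ [(1 : Int)]
      else line ++ [(0 : Int)]) = fun line t => line ++ [pvCell f t] := by
    funext line t; unfold pvCell; split_ifs <;> rfl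
  rw [h, pv_foldl_app]

theorem pvA_eq (ts : List Int) : get_attention_mask ts = pvMatrix ts := by
  unfold get_attention_mask pvMatrix
  have h : (fun (attention_mask : List (List Int)) (f : Int) =>
      attention_mask ++
        [ts.foldl (fun line t =>
          if t ≤ 1 then line ++ [(1 : Int)]
          else if f = t then line ++ [(1 : Int)]
          else line ++ [(0 : Int)]) []]) =
      fun attention_mask f => attention_mask ++ [ts.map (pvCell f)] := by
    funext a f; rw [pvA_inner]; rfl
  rw [h, pv_foldl_app]; rfl

-- B's index table: lookup at f yields the (column, value)-pairs of value f, value > 1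
def pvJs (ts : List Int) (f : Int) : List Int :=
  (((PySem.List.enumerate ts 0).filter (fun p => decide (1 < p.2))).filter
      (fun p => p.2 == f)).map (·.1)

theorem pvGroups_getD (ts : List Int) (f : Int) :
    (((PySem.List.enumerate ts 0).foldl
        (fun d p => if 1 < p.2 then d.modify p.2 [] (· ++ [p.1]) else d)
        (PySem.Dict.empty : PySem.Dict Int (List Int))).getD f []) = pvJs ts f := by
  rw [show (fun (d : PySem.Dict Int (List Int)) (p : Int × Int) =>
        if 1 < p.2 then d.modify p.2 [] (· ++ [p.1]) else d) =
      (fun d p => if decide (1 < p.2) = true then d.modify p.2 [] (· ++ [p.1]) else d) by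
    funext d p; simp]
  rw [← List.foldl_filter]
  rw [show ((PySem.List.enumerate ts 0).filter (fun p => decide (1 < p.2))).foldl
        (fun (d : PySem.Dict Int (List Int)) p => d.modify p.2 [] (· ++ [p.1]))
        PySem.Dict.empty =
      (((PySem.List.enumerate ts 0).filter (fun p => decide (1 < p.2))).map
          (fun p => (p.2, p.1))).foldl
        (fun d q => d.modify q.1 [] (· ++ [q.2])) PySem.Dict.empty by
    rw [List.foldl_map]]
  rw [PySem.Dict.getD_foldl_modify_append]
  unfold pvJs
  simp [List.filter_map, List.filter_filter, Function.comp]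

theorem pvJs_mem (ts : List Int) (f : Int) (j : Int) :
    j ∈ pvJs ts f ↔ ∃ (k : Nat) (h : k < ts.length), ts[k] = f ∧ 1 < f ∧ j = (k : Int) := by
  unfold pvJs
  simp only [List.mem_map, List.mem_filter, PySem.List.mem_enumerate_iff]
  constructor
  · rintro ⟨p, ⟨⟨⟨k, hk, rfl⟩, h1⟩, h2⟩, rfl⟩
    simp at h1 h2
    exact ⟨k, hk, h2, by omega, by simp⟩
  · rintro ⟨k, hk, hv, hf, rfl⟩
    exact ⟨((k : Int), ts[k]), ⟨⟨⟨k, hk, by simp⟩, by simp; omega⟩, by simp [hv]⟩, rfl⟩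

-- folding row[j] = 1 over nonnegative in-range indices, pointwise
theorem pv_setFold_get? (js : List Int) :
    ∀ (r : List Int), (∀ j ∈ js, 0 ≤ j ∧ j < r.length) → ∀ (i : Nat),
      (js.foldl (fun row j => PySem.List.pySetD row j (1 : Int)) r)[i]? =
        if (i : Int) ∈ js then (if i < r.length then some 1 else none) else r[i]? := by
  induction js with
  | nil => intro r _ i; simp
  | cons j js ih =>
    intro r hb i
    have hj := hb j (by simp)
    have hset : PySem.List.pySetD r j (1 : Int) = r.set j.toNat 1 :=
      PySem.List.pySetD_of_nonneg r 1 hj.1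
    have hb' : ∀ j' ∈ js, 0 ≤ j' ∧ j' < (PySem.List.pySetD r j (1 : Int)).length := by
      intro j' hj'
      have := hb j' (by simp [hj'])
      simpa [PySem.List.length_pySetD] using this
    rw [List.foldl_cons, ih _ hb' i, hset]
    simp only [List.length_set, List.getElem?_set, List.mem_cons]
    by_cases hmem : (i : Int) ∈ js
    · simp [hmem]
    · by_cases hij : (i : Int) = j
      · have h1 : j.toNat = i := by omega
        have h2 : i < r.length := by omega
        simp [hij, h1, h2]
      · have h1 : ¬ j.toNat = i := by omega
        simp [hmem, hij, h1]

theorem pv_rowB (ts : List Int) (f : Int) :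
    (pvJs ts f).foldl (fun row j => PySem.List.pySetD row j (1 : Int))
        (ts.map (fun t => if t ≤ 1 then (1 : Int) else 0)) = ts.map (pvCell f) := by
  have hb : ∀ j ∈ pvJs ts f, 0 ≤ j ∧
      j < ((ts.map (fun t => if t ≤ 1 then (1 : Int) else 0)).length : Int) := by
    intro j hj
    rw [pvJs_mem] at hj
    obtain ⟨k, hk, _, _, rfl⟩ := hj
    simp; omega
  apply List.ext_getElem?
  intro i
  rw [pv_setFold_get? _ _ hb i]
  by_cases hi : i < ts.length
  · have hmem : (i : Int) ∈ pvJs ts f ↔ (ts[i] = f ∧ 1 < f) := by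
      rw [pvJs_mem]
      constructor
      · rintro ⟨k, hk, hv, hf, hik⟩
        have : k = i := by omega
        subst this; exact ⟨hv, hf⟩
      · rintro ⟨hv, hf⟩; exact ⟨i, hi, hv, hf, rfl⟩
    simp only [List.length_map, hi, if_pos, List.getElem?_eq_getElem, hmem]
    unfold pvCell
    by_cases h1 : ts[i] ≤ 1
    · have : ¬ (ts[i] = f ∧ 1 < f) := by rintro ⟨rfl, hf⟩; omega
      simp [h1, this]
    · by_cases h2 : f = ts[i]
      · have hcond : ts[i] = f ∧ 1 < f := ⟨h2.symm, by rw [h2]; omega⟩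
        rw [if_pos hcond]; simp [List.getElem_map, h1, h2]
      · have : ¬ (ts[i] = f ∧ 1 < f) := by rintro ⟨rfl, _⟩; exact h2 rfl
        simp [h1, h2, this]
  · have hmem : ¬ (i : Int) ∈ pvJs ts f := by
      rw [pvJs_mem]; rintro ⟨k, hk, _, _, hik⟩; omega
    simp [hmem, hi]

theorem pvB_eq (ts : List Int) : get_attention_mask_alt ts = pvMatrix ts := by
  unfold get_attention_mask_alt pvMatrix
  simp only []
  have h : (fun (mask : List (List Int)) (f : Int) =>
      mask ++ [(((PySem.List.enumerate ts 0).foldl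
          (fun d p => if 1 < p.2 then d.modify p.2 [] (· ++ [p.1]) else d)
          (PySem.Dict.empty : PySem.Dict Int (List Int))).getD f []).foldl
            (fun row j => PySem.List.pySetD row j (1 : Int))
            (ts.map (fun t => if t ≤ 1 then (1 : Int) else 0))]) =
      fun mask f => mask ++ [ts.map (pvCell f)] := by
    funext m f
    rw [pvGroups_getD, pv_rowB]
  rw [h, pv_foldl_app]; rfl

-- ===== VERDICT (by name: the statement is the Claim_ definition above) =====
theorem get_attention_mask_spec : Claim_equal_get_attention_mask := by
  intro ts _
  unfold Spec_get_attention_mask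
  rw [pvA_eq, pvB_eq]
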